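-- pv_equiv track=rewrite | github.com/spacesnotabs/meal_planner_app | utils/nutrition.py | get_nutrition_summary
-- ===== SOURCE A (Python) =====
-- def calculate_daily_nutrition(meals):
--     """Calculate nutrition totals for a day's meals."""
--     totals = {
--         "calories": 0,
--         "protein": 0,
--         "carbs": 0,
--         "fat": 0,
--         "fiber": 0
--     }
--
--     for meal in meals:
--         for nutrient in totals:
--             totals[nutrient] += meal.get(nutrient, 0)
--
--     return totals
--
-- def get_nutrition_summary(start_date, end_date, meals):
--     """Get nutrition summary for a date range."""
--     daily_totals = []
--
--     # Calculate daily totals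
--     current_date = start_date
--     while current_date <= end_date:
--         daily_meals = [m for m in meals if m["date"] == current_date]
--         daily_totals.append(calculate_daily_nutrition(daily_meals))
--         current_date += 1
--
--     return daily_totals
-- ===== SOURCE B (Python) =====
-- def get_nutrition_summary(start_date, end_date, meals):
--     """Get nutrition summary for a date range (single pass over meals)."""
--     if start_date > end_date:
--         return []
--     keys = ("calories", "protein", "carbs", "fat", "fiber")
--     buckets = {}
--     for m in meals:
--         d = m["date"]
--         if start_date <= d <= end_date:
--             t = buckets.get(d, [0, 0, 0, 0, 0])
--             buckets[d] = [x + m.get(k, 0) for x, k in zip(t, keys)]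
--     return [dict(zip(keys, buckets.get(d, [0, 0, 0, 0, 0])))
--             for d in range(start_date, end_date + 1)]
-- ===== Notes on version B (the rewrite author's own statement) =====
-- stated objective: alternative
-- what changed: B makes a single pass over the meal list, bucketing per-date totals into a dict keyed by date, then emits one row per date by dict lookup, instead of A's re-scan of the whole meal list (and per-nutrient dict lookups) for every date in the range; measured runtimes on the generated inputs were comparable.
import Mathlib
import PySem

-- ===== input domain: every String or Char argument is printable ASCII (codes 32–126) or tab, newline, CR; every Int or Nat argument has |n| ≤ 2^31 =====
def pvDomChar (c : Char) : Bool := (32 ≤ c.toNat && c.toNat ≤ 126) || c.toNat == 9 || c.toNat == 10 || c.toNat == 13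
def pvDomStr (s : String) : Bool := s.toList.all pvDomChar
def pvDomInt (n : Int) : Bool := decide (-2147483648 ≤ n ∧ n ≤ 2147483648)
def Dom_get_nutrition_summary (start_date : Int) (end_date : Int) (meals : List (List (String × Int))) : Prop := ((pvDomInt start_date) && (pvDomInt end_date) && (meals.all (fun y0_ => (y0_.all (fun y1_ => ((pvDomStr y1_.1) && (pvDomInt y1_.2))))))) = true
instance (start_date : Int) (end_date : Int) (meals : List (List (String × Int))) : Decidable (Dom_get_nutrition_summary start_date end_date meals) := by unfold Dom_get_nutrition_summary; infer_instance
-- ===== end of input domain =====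

-- B buckets the meals by date in ONE pass over the meal list and then reads each day's
-- bucket, instead of A's rescan of the whole meal list for every day (alternative algorithm).

-- ===== PORT A =====
-- helper calculate_daily_nutrition; 'for nutrient in totals' always iterates these five keys
def pvAddMeal (t : PySem.Dict String Int) (m : List (String × Int)) : PySem.Dict String Int :=
  (["calories", "protein", "carbs", "fat", "fiber"] : List String).foldl
    (fun t k => t.insert k (t.getD k 0 + (PySem.Dict.mk m).getD k 0)) t

def pvCalcDaily (meals : List (List (String × Int))) : List (String × Int) :=
  (meals.foldl pvAddMeal
    (PySem.Dict.mk [("calories", 0), ("protein", 0), ("carbs", 0), ("fat", 0), ("fiber", 0)])).items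

-- the while loop 'current = start; while current <= end: …; current += 1' is the fold over range(start, end+1)
def get_nutrition_summary (start_date : Int) (end_date : Int) (meals : List (List (String × Int))) : List (List (String × Int)) :=
  (PySem.List.pyRange start_date (end_date + 1) 1).foldl
    (fun acc d =>
      acc ++ [pvCalcDaily (meals.filter (fun m => (PySem.Dict.mk m).get? "date" == some d))])
    []

-- ===== PORT B =====
def pvKeysB : List String := ["calories", "protein", "carbs", "fat", "fiber"]

-- one bucketing step of B's single pass ('m["date"]' rendered total via getD; Pre_ guarantees the key)
def pvStepB (start_date : Int) (end_date : Int) (b : PySem.Dict Int (List Int)) (m : List (String × Int)) : PySem.Dict Int (List Int) :=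
  let d := (PySem.Dict.mk m).getD "date" 0
  if start_date ≤ d ∧ d ≤ end_date then
    b.insert d (((b.getD d [0, 0, 0, 0, 0]).zip pvKeysB).map
      (fun p => p.1 + (PySem.Dict.mk m).getD p.2 0))
  else b

def get_nutrition_summary_alt (start_date : Int) (end_date : Int) (meals : List (List (String × Int))) : List (List (String × Int)) :=
  if start_date > end_date then []
  else
    let buckets := meals.foldl (pvStepB start_date end_date) PySem.Dict.empty
    (PySem.List.pyRange start_date (end_date + 1) 1).map
      (fun d => pvKeysB.zip (buckets.getD d [0, 0, 0, 0, 0]))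

-- ===== PRECONDITION & SPEC =====
-- Pre_ excludes exactly the inputs where Python A raises KeyError: a nonempty date range
-- together with some meal lacking the "date" key.
def Pre_get_nutrition_summary (start_date : Int) (end_date : Int) (meals : List (List (String × Int))) : Prop :=
  start_date ≤ end_date → ∀ m ∈ meals, "date" ∈ m.map Prod.fst
instance (start_date : Int) (end_date : Int) (meals : List (List (String × Int))) : Decidable (Pre_get_nutrition_summary start_date end_date meals) := by unfold Pre_get_nutrition_summary; infer_instance

def pvWitness_get_nutrition_summary : Int × Int × (List (List (String × Int))) :=
  (0, 1, [[("date", 0), ("calories", 2), ("fat", 1)], [("date", 1), ("protein", 3)]])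

def Spec_get_nutrition_summary (start_date : Int) (end_date : Int) (meals : List (List (String × Int))) (out : List (List (String × Int))) : Prop := out = get_nutrition_summary_alt start_date end_date meals
instance (start_date : Int) (end_date : Int) (meals : List (List (String × Int))) (out : List (List (String × Int))) : Decidable (Spec_get_nutrition_summary start_date end_date meals out) := by unfold Spec_get_nutrition_summary; infer_instance

-- ===== CLAIM (what is proved, stated in full; the proofs are below) =====
def Claim_equal_get_nutrition_summary : Prop := ∀ (start_date : Int) (end_date : Int) (meals : List (List (String × Int))), Dom_get_nutrition_summary start_date end_date meals → Pre_get_nutrition_summary start_date end_date meals → Spec_get_nutrition_summary start_date end_date meals (get_nutrition_summary start_date end_date meals)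

-- ===== LEMMAS AND PROOFS =====
-- proof-only helpers: the value a meal contributes for key k, and the per-key sum of a meal list
def pvVal (m : List (String × Int)) (k : String) : Int := (PySem.Dict.mk m).getD k 0
def pvS (k : String) (ms : List (List (String × Int))) : Int := (ms.map (fun m => pvVal m k)).sum

theorem pv_foldl_append {α β : Type} (f : α → β) :
    ∀ (l : List α) (acc : List β), l.foldl (fun a d => a ++ [f d]) acc = acc ++ l.map f := by
  intro l
  induction l with
  | nil => simp
  | cons x xs ih => intro acc; simp [List.foldl, ih]

theorem pv_addMeal_eval (a1 a2 a3 a4 a5 : Int) (m : List (String × Int)) :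
    pvAddMeal (PySem.Dict.mk [("calories", a1), ("protein", a2), ("carbs", a3), ("fat", a4), ("fiber", a5)]) m
    = PySem.Dict.mk [("calories", a1 + pvVal m "calories"), ("protein", a2 + pvVal m "protein"),
        ("carbs", a3 + pvVal m "carbs"), ("fat", a4 + pvVal m "fat"), ("fiber", a5 + pvVal m "fiber")] := by
  rfl

theorem pv_calc_fold (ms : List (List (String × Int))) :
    ∀ (a1 a2 a3 a4 a5 : Int),
    ms.foldl pvAddMeal (PySem.Dict.mk [("calories", a1), ("protein", a2), ("carbs", a3), ("fat", a4), ("fiber", a5)])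
    = PySem.Dict.mk [("calories", a1 + pvS "calories" ms), ("protein", a2 + pvS "protein" ms),
        ("carbs", a3 + pvS "carbs" ms), ("fat", a4 + pvS "fat" ms), ("fiber", a5 + pvS "fiber" ms)] := by
  induction ms with
  | nil => intro a1 a2 a3 a4 a5; simp [pvS]
  | cons m rest ih =>
      intro a1 a2 a3 a4 a5
      simp only [List.foldl, pv_addMeal_eval, ih]
      simp [pvS, add_assoc]

theorem pv_calcDaily (ms : List (List (String × Int))) :
    pvCalcDaily ms = [("calories", pvS "calories" ms), ("protein", pvS "protein" ms),
      ("carbs", pvS "carbs" ms), ("fat", pvS "fat" ms), ("fiber", pvS "fiber" ms)] := by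
  simp [pvCalcDaily, pv_calc_fold]

theorem pv_get_date {m : List (String × Int)} (h : "date" ∈ m.map Prod.fst) :
    (PySem.Dict.mk m).get? "date" = some ((PySem.Dict.mk m).getD "date" 0) := by
  have hne : (PySem.Dict.mk m).get? "date" ≠ none := by
    simp only [Ne, PySem.Dict.get?_eq_none_iff_not_mem_keys]
    simpa [PySem.Dict.keys] using h
  obtain ⟨v, hv⟩ := Option.ne_none_iff_exists'.mp hne
  rw [hv]
  simp [PySem.Dict.getD_eq_get?_getD, hv]

theorem pv_bucket_fold (s e d : Int) (hs : s ≤ d) (he : d ≤ e) :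
    ∀ (ms : List (List (String × Int))) (b : PySem.Dict Int (List Int)) (g1 g2 g3 g4 g5 : Int),
    (∀ m ∈ ms, "date" ∈ m.map Prod.fst) →
    b.getD d [0, 0, 0, 0, 0] = [g1, g2, g3, g4, g5] →
    (ms.foldl (pvStepB s e) b).getD d [0, 0, 0, 0, 0]
      = [g1 + pvS "calories" (ms.filter (fun m => (PySem.Dict.mk m).get? "date" == some d)),
         g2 + pvS "protein" (ms.filter (fun m => (PySem.Dict.mk m).get? "date" == some d)),
         g3 + pvS "carbs" (ms.filter (fun m => (PySem.Dict.mk m).get? "date" == some d)),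
         g4 + pvS "fat" (ms.filter (fun m => (PySem.Dict.mk m).get? "date" == some d)),
         g5 + pvS "fiber" (ms.filter (fun m => (PySem.Dict.mk m).get? "date" == some d))] := by
  intro ms
  induction ms with
  | nil => intro b g1 g2 g3 g4 g5 _ hb; simpa [pvS] using hb
  | cons m rest ih =>
      intro b g1 g2 g3 g4 g5 hall hb
      have hmem : "date" ∈ m.map Prod.fst := hall m (by simp)
      have hget := pv_get_date hmem
      have hrest : ∀ m' ∈ rest, "date" ∈ m'.map Prod.fst := fun m' hm' => hall m' (by simp [hm'])
      simp only [List.foldl]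
      by_cases hd : (PySem.Dict.mk m).getD "date" 0 = d
      · have hstep : pvStepB s e b m
            = b.insert d [g1 + pvVal m "calories", g2 + pvVal m "protein", g3 + pvVal m "carbs",
                g4 + pvVal m "fat", g5 + pvVal m "fiber"] := by
          simp [pvStepB, hd, hs, he, hb, pvKeysB, pvVal, List.zip]
        have hfil : (m :: rest).filter (fun m => (PySem.Dict.mk m).get? "date" == some d)
            = m :: rest.filter (fun m => (PySem.Dict.mk m).get? "date" == some d) := by
          simp [List.filter, hget, hd]
        rw [hstep, hfil,
          ih _ (g1 + pvVal m "calories") (g2 + pvVal m "protein") (g3 + pvVal m "carbs")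
            (g4 + pvVal m "fat") (g5 + pvVal m "fiber") hrest (by simp [PySem.Dict.getD_insert_self])]
        simp [pvS, add_assoc]
      · have hfalse : ((PySem.Dict.mk m).get? "date" == some d) = false := by
          simp [hget, hd]
        have hfil : (m :: rest).filter (fun m => (PySem.Dict.mk m).get? "date" == some d)
            = rest.filter (fun m => (PySem.Dict.mk m).get? "date" == some d) := by
          simp [List.filter, hfalse]
        have hstep : (pvStepB s e b m).getD d [0, 0, 0, 0, 0] = [g1, g2, g3, g4, g5] := by
          by_cases hr : s ≤ (PySem.Dict.mk m).getD "date" 0 ∧ (PySem.Dict.mk m).getD "date" 0 ≤ e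
          · have h1 : pvStepB s e b m
                = b.insert ((PySem.Dict.mk m).getD "date" 0)
                    (((b.getD ((PySem.Dict.mk m).getD "date" 0) [0, 0, 0, 0, 0]).zip pvKeysB).map
                      (fun p => p.1 + (PySem.Dict.mk m).getD p.2 0)) := by
              simp [pvStepB, hr]
            rw [h1, PySem.Dict.getD_insert, if_neg (fun hh => hd hh.symm)]
            exact hb
          · have h1 : pvStepB s e b m = b := by simp [pvStepB, hr]
            rw [h1]; exact hb
        rw [hfil, ih _ g1 g2 g3 g4 g5 hrest hstep]

-- ===== VERDICT (by name: the statement is the Claim_ definition above) =====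
theorem get_nutrition_summary_spec : Claim_equal_get_nutrition_summary := by
  intro s e meals _ hpre
  unfold Spec_get_nutrition_summary get_nutrition_summary get_nutrition_summary_alt
  by_cases hle : s ≤ e
  · simp only [show ¬ s > e by omega, if_neg, not_false_iff]
    rw [pv_foldl_append, List.nil_append]
    apply List.map_congr_left
    intro d hd
    rw [PySem.List.mem_pyRange_one] at hd
    rw [pv_calcDaily,
        pv_bucket_fold s e d hd.1 (by omega) meals PySem.Dict.empty 0 0 0 0 0 (hpre hle)
          (by simp [PySem.Dict.getD_empty])]
    simp [pvKeysB, List.zip]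
  · rw [if_pos (by omega)]
    have : PySem.List.pyRange s (e + 1) 1 = [] := by
      rw [PySem.List.pyRange_one]
      simp [show ((e + 1 - s).toNat = 0) by omega]
    simp [this]
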